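-- pv_equiv track=rewrite | github.com/Gyusik-Choi/algorithm | programmers/대충 만든 자판/대충 만든 자판.py | solution
-- ===== SOURCE A (Python) =====
-- def solution(keymap, targets):
--     key_dict = dict()
--
--     for word in keymap:
--         for idx, char in enumerate(word):
--             if char in key_dict:
--                 key_dict[char] = min(key_dict[char], idx + 1)
--             else:
--                 key_dict[char] = idx + 1
--
--     result = []
--
--     for target in targets:
--         sums = 0
--
--         for idx, t in enumerate(target):
--             if t in key_dict:
--                 sums += key_dict[t]
--             else:
--                 sums = -1
--                 break
--
--         result.append(sums)
--
--     return result
-- ===== SOURCE B (Python) =====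
-- def solution(keymap, targets):
--     result = []
--     for target in targets:
--         total = 0
--         for t in target:
--             best = None
--             for word in keymap:
--                 if t in word:
--                     i = word.index(t) + 1
--                     if best is None or i < best:
--                         best = i
--             if best is None:
--                 total = -1
--                 break
--             total += best
--         result.append(total)
--     return result
-- ===== Notes on version B (the rewrite author's own statement) =====
-- stated objective: alternative
-- what changed: B drops A's precomputed per-character dictionary entirely and instead, for each target character, scans the keymap directly taking the minimum of word.index(t)+1 over words containing t.
import Mathlib
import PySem

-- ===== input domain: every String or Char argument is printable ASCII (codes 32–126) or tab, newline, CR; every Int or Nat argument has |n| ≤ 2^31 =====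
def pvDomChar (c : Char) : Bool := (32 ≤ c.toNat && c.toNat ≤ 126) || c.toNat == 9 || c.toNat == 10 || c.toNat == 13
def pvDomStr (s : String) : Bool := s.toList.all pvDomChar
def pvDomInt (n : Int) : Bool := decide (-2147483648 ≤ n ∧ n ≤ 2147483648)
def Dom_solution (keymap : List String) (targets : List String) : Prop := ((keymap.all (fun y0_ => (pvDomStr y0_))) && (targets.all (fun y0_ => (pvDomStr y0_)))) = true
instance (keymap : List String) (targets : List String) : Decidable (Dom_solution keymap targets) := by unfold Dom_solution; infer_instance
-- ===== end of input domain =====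

-- B replaces A's precomputed per-character dictionary by a direct scan of the keymap
-- for each target character (objective: alternative decomposition, similar cost).

-- ===== PORT A =====
-- inner loop 'for idx, char in enumerate(word)': recursion carrying the running index
def insWordA (d : PySem.Dict Char Int) (idx : Int) : List Char → PySem.Dict Char Int
  | [] => d
  | c :: cs =>
      match d.get? c with
      | some v => insWordA (d.insert c (min v (idx + 1))) (idx + 1) cs
      | none => insWordA (d.insert c (idx + 1)) (idx + 1) cs

-- 'for idx, t in enumerate(target)' with break on a missing char
def sumTargetA (d : PySem.Dict Char Int) : List Char → Int → Int
  | [], sums => sums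
  | t :: ts, sums =>
      match d.get? t with
      | some v => sumTargetA d ts (sums + v)
      | none => -1

def solution (keymap : List String) (targets : List String) : List Int :=
  let keyDict := keymap.foldl (fun d w => insWordA d 0 w.toList) PySem.Dict.empty
  targets.map (fun target => sumTargetA keyDict target.toList 0)

-- ===== PORT B =====
-- 'for word in keymap: if t in word: …' keeping the best (smallest) index+1 seen so far
def bestB (keymap : List String) (t : Char) : Option Int :=
  keymap.foldl
    (fun best w =>
      match PySem.List.index? w.toList t with
      | some i =>
          match best with
          | some m => if (i : Int) + 1 < m then some ((i : Int) + 1) else some m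
          | none => some ((i : Int) + 1)
      | none => best)
    none

def sumTargetB (keymap : List String) : List Char → Int → Int
  | [], total => total
  | t :: ts, total =>
      match bestB keymap t with
      | some v => sumTargetB keymap ts (total + v)
      | none => -1

def solution_alt (keymap : List String) (targets : List String) : List Int :=
  targets.map (fun target => sumTargetB keymap target.toList 0)

-- ===== PRECONDITION & SPEC =====
def Spec_solution (keymap : List String) (targets : List String) (out : List Int) : Prop := out = solution_alt keymap targets
instance (keymap : List String) (targets : List String) (out : List Int) : Decidable (Spec_solution keymap targets out) := by unfold Spec_solution; infer_instance

-- ===== CLAIM (what is proved, stated in full; the proofs are below) =====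
def Claim_equal_solution : Prop := ∀ (keymap : List String) (targets : List String), Dom_solution keymap targets → Spec_solution keymap targets (solution keymap targets)

-- ===== LEMMAS AND PROOFS =====

-- option-min combinator: the common shape of both folds
def omin : Option Int → Option Int → Option Int
  | none, b => b
  | a, none => a
  | some x, some y => some (min x y)

-- contribution of one word starting at offset idx (A's inner loop semantics)
def shiftVal (idx : Int) : Option Nat → Option Int
  | none => none
  | some i => some (idx + (i : Int) + 1)

-- the value a word contributes for character t: first index + 1 (none if absent)
def wordVal (w : List Char) (t : Char) : Option Int :=
  match PySem.List.index? w t with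
  | none => none
  | some i => some ((i : Int) + 1)

theorem omin_none_right (a : Option Int) : omin a none = a := by
  cases a <;> rfl

theorem omin_assoc (a b c : Option Int) : omin (omin a b) c = omin a (omin b c) := by
  cases a <;> cases b <;> cases c <;> simp [omin, min_assoc]

theorem shiftVal_zero (o : Option Nat) : shiftVal 0 o = (match o with
    | none => none
    | some i => some ((i : Int) + 1)) := by
  cases o with
  | none => rfl
  | some i => simp only [shiftVal]; congr 1; ring

theorem insWordA_get? (w : List Char) :
    ∀ (d : PySem.Dict Char Int) (idx : Int) (t : Char),
      (insWordA d idx w).get? t =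
        omin (d.get? t) (shiftVal idx (PySem.List.index? w t)) := by
  induction w with
  | nil =>
    intro d idx t
    simp [insWordA, PySem.List.index?_eq_idxOf?, shiftVal, omin_none_right]
  | cons c cs ih =>
    intro d idx t
    by_cases hct : c = t
    · subst hct
      rw [PySem.List.index?_cons_self]
      have key : ∀ (a : Int), a ≤ idx + 1 →
          omin (some a) (shiftVal (idx + 1) (PySem.List.index? cs c)) = some a := by
        intro a ha
        cases h : PySem.List.index? cs c with
        | none => rfl
        | some i =>
          simp only [shiftVal, omin]
          have hi : (0 : Int) ≤ (i : Int) := Int.natCast_nonneg i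
          congr 1
          omega
      simp only [insWordA]
      cases h : d.get? c with
      | some v =>
        dsimp only
        rw [ih _ (idx + 1) c, PySem.Dict.get?_insert_self,
            key (min v (idx + 1)) (min_le_right _ _)]
        simp only [shiftVal, omin]
        congr 1
        omega
      | none =>
        dsimp only
        rw [ih _ (idx + 1) c, PySem.Dict.get?_insert_self, key (idx + 1) le_rfl]
        simp only [shiftVal, omin]
        congr 1
        omega
    · rw [PySem.List.index?_cons_of_ne cs hct]
      simp only [insWordA]
      have shift : shiftVal (idx + 1) (PySem.List.index? cs t) =
          shiftVal idx ((PySem.List.index? cs t).map (· + 1)) := by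
        cases PySem.List.index? cs t with
        | none => rfl
        | some i => simp only [Option.map_some, shiftVal]; congr 1; push_cast; ring
      cases d.get? c with
      | some v =>
        rw [ih _ (idx + 1) t, PySem.Dict.get?_insert_of_ne _ _ (Ne.symm hct), shift]
      | none =>
        rw [ih _ (idx + 1) t, PySem.Dict.get?_insert_of_ne _ _ (Ne.symm hct), shift]

-- B's fold step is omin with the word's contribution
theorem bestB_step (best : Option Int) (w : List Char) (t : Char) :
    (match PySem.List.index? w t with
      | some i =>
          match best with
          | some m => if (i : Int) + 1 < m then some ((i : Int) + 1) else some m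
          | none => some ((i : Int) + 1)
      | none => best) = omin best (wordVal w t) := by
  cases h : PySem.List.index? w t with
  | none => rw [wordVal, h, omin_none_right]
  | some i =>
    rw [wordVal, h]
    cases best with
    | none => rfl
    | some m =>
      simp only [omin]
      split_ifs with hlt
      · congr 1; rw [min_def, if_neg (by omega)]
      · congr 1; rw [min_def, if_pos (by omega)]

-- folding omin over a list, starting from any accumulator
theorem foldl_omin (l : List String) (f : List Char → Char → Option Int) (t : Char) :
    ∀ b : Option Int,
      l.foldl (fun acc w => omin acc (f w.toList t)) b =
        omin b (l.foldl (fun acc w => omin acc (f w.toList t)) none) := by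
  induction l with
  | nil => intro b; simp [omin_none_right]
  | cons w ws ih =>
    intro b
    simp only [List.foldl_cons]
    rw [ih (omin b (f w.toList t)), ih (omin none (f w.toList t)), omin_assoc]
    rfl

theorem bestB_eq_omin_fold (keymap : List String) (t : Char) :
    bestB keymap t = keymap.foldl (fun acc w => omin acc (wordVal w.toList t)) none := by
  unfold bestB
  congr 1
  funext best w
  exact bestB_step best w.toList t

-- the dict A builds answers exactly what B's scan answers
theorem keyDict_get?_eq_bestB (keymap : List String) (t : Char) :
    (keymap.foldl (fun d w => insWordA d 0 w.toList) PySem.Dict.empty).get? t = bestB keymap t := by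
  rw [bestB_eq_omin_fold]
  have main : ∀ (l : List String) (d : PySem.Dict Char Int),
      (l.foldl (fun d w => insWordA d 0 w.toList) d).get? t =
        omin (d.get? t) (l.foldl (fun acc w => omin acc (wordVal w.toList t)) none) := by
    intro l
    induction l with
    | nil => intro d; simp [omin_none_right]
    | cons w ws ih =>
      intro d
      simp only [List.foldl_cons]
      rw [ih, insWordA_get?, shiftVal_zero]
      have hwv : (match PySem.List.index? w.toList t with
          | none => none
          | some i => some ((i : Int) + 1)) = wordVal w.toList t := rfl
      rw [hwv, omin_assoc, foldl_omin ws wordVal t (omin none (wordVal w.toList t))]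
      rfl
  rw [main keymap PySem.Dict.empty]
  rfl

theorem sumTarget_eq (keymap : List String) (ts : List Char) :
    ∀ s : Int,
      sumTargetA (keymap.foldl (fun d w => insWordA d 0 w.toList) PySem.Dict.empty) ts s =
        sumTargetB keymap ts s := by
  induction ts with
  | nil => intro s; rfl
  | cons t ts ih =>
    intro s
    simp only [sumTargetA, sumTargetB, keyDict_get?_eq_bestB]
    cases bestB keymap t with
    | none => rfl
    | some v => exact ih (s + v)

-- ===== VERDICT (by name: the statement is the Claim_ definition above) =====
theorem solution_spec : Claim_equal_solution := by
  intro keymap targets _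
  unfold Spec_solution solution solution_alt
  apply List.map_congr_left
  intro t _
  exact sumTarget_eq keymap t.toList 0
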